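-- pv_equiv track=rewrite | github.com/project-anuvaad/ocr-toolkit | eval_S/cut_lines.py | remove_trailing_space
-- ===== SOURCE A (Python) =====
-- def remove_trailing_space(a):
--     m_text = ''
--     for text in a.split(' '):
--         if len(text) > 0:
--             if m_text == '' :
--                 m_text += text
--             else :
--                 m_text = m_text + ' ' + text
--     return m_text
-- ===== SOURCE B (Python) =====
-- def remove_trailing_space(a):
--     out = []
--     pending = False
--     for ch in a:
--         if ch == ' ':
--             if out:
--                 pending = True
--         else:
--             if pending:
--                 out.append(' ')
--                 pending = False
--             out.append(ch)
--     return ''.join(out)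
-- ===== Notes on version B (the rewrite author's own statement) =====
-- stated objective: alternative
-- what changed: Replaced the split-on-space/filter/string-concatenation loop by a single character scan that keeps an output list and a pending-space flag and joins once at the end.
import Mathlib
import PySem

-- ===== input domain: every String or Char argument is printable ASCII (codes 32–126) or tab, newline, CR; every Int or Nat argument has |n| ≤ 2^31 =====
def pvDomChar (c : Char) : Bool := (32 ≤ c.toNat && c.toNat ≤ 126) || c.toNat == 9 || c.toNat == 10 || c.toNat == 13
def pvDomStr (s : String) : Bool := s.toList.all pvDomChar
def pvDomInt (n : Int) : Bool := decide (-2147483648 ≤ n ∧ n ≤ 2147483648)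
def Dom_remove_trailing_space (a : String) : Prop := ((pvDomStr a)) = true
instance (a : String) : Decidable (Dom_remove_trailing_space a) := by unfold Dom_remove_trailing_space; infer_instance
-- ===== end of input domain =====

-- B replaces A's split-on-space/filter/string-concatenation join by a single character scan
-- with a pending-space flag (alternative one-pass decomposition).


-- ===== PORT A =====
-- A's loop body: skip empty pieces; first kept piece starts m_text, later ones joined by ' '
def pvF (m text : List Char) : List Char :=
  if 0 < text.length then (if m = [] then m ++ text else (m ++ [' ']) ++ text) else m

-- a.split(' ') is PySem.Chars.splitOn with the one-char separator (sep ≠ '')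
def remove_trailing_space (a : String) : String :=
  String.mk ((PySem.Chars.splitOn a.toList [' ']).foldl pvF [])

-- ===== PORT B =====
-- B's scan: acc = emitted chars, pending = a space gap seen after some output
def rtsB : List Char → List Char → Bool → List Char
  | [], acc, _ => acc
  | c :: cs, acc, pending =>
    if c = ' ' then rtsB cs acc (if acc ≠ [] then true else pending)
    else rtsB cs (acc ++ (if pending then [' ', c] else [c])) false

def remove_trailing_space_alt (a : String) : String :=
  String.mk (rtsB a.toList [] false)

-- ===== PRECONDITION & SPEC =====
def Spec_remove_trailing_space (a : String) (out : String) : Prop := out = remove_trailing_space_alt a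
instance (a : String) (out : String) : Decidable (Spec_remove_trailing_space a out) := by unfold Spec_remove_trailing_space; infer_instance

-- ===== CLAIM (what is proved, stated in full; the proofs are below) =====
def Claim_equal_remove_trailing_space : Prop := ∀ (a : String), Dom_remove_trailing_space a → Spec_remove_trailing_space a (remove_trailing_space a)

-- ===== LEMMAS AND PROOFS =====

-- simple recursive characterisation of splitOn on a one-char separator
def pvSplit : List Char → List (List Char)
  | [] => [[]]
  | c :: cs => if c = ' ' then [] :: pvSplit cs else (c :: (pvSplit cs).headI) :: (pvSplit cs).tail

-- join of the nonempty pieces, each preceded by one space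
def pvJ : List (List Char) → List Char
  | [] => []
  | t :: ps => if t = [] then pvJ ps else (' ' :: t) ++ pvJ ps

-- join of the nonempty pieces, the first one without a leading space
def pvA : List (List Char) → List Char
  | [] => []
  | t :: ps => if t = [] then pvA ps else t ++ pvJ ps

theorem pvSplit_ne_nil (cs : List Char) : pvSplit cs ≠ [] := by
  cases cs with
  | nil => simp [pvSplit]
  | cons c cs => simp only [pvSplit]; split <;> simp

theorem go_cons (f : Nat) (c : Char) (rest cur : List Char) (acc : List (List Char)) :
    PySem.Chars.splitOn.go [' '] (f+1) (c::rest) cur acc =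
      (if [' '].isPrefixOf (c::rest) then PySem.Chars.splitOn.go [' '] f rest [] (cur.reverse :: acc)
       else PySem.Chars.splitOn.go [' '] f rest (c :: cur) acc) := rfl

theorem go_eq (fuel : Nat) : ∀ (l cur : List Char) (acc : List (List Char)), l.length ≤ fuel →
    PySem.Chars.splitOn.go [' '] fuel l cur acc
      = acc.reverse ++ (pvSplit l).modifyHead (cur.reverse ++ ·) := by
  induction fuel with
  | zero =>
    intro l cur acc h
    have : l = [] := by cases l <;> simp_all
    subst this
    rw [PySem.Chars.splitOn.go.eq_def]
    simp [pvSplit]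
  | succ f ih =>
    intro l cur acc h
    cases l with
    | nil => rw [PySem.Chars.splitOn.go.eq_def]; simp [pvSplit]
    | cons c rest =>
      rw [go_cons]
      by_cases hc : c = ' '
      · subst hc
        rw [if_pos (by simp [List.isPrefixOf])]
        rw [ih rest [] _ (by simpa using h)]
        simp only [pvSplit, List.modifyHead]
        rcases h' : pvSplit rest with _ | ⟨hd, tl⟩
        · exact absurd h' (pvSplit_ne_nil rest)
        · simp
      · rw [if_neg (by simp [List.isPrefixOf]; exact fun h' => hc h'.symm)]
        rw [ih rest (c :: cur) acc (by simpa using h)]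
        simp only [pvSplit, if_neg hc]
        rcases h' : pvSplit rest with _ | ⟨hd, tl⟩
        · exact absurd h' (pvSplit_ne_nil rest)
        · simp

theorem splitOn_eq (l : List Char) : PySem.Chars.splitOn l [' '] = pvSplit l := by
  rw [PySem.Chars.splitOn, go_eq (l.length + 1) l [] [] (by omega)]
  rcases h' : pvSplit l with _ | ⟨hd, tl⟩
  · exact absurd h' (pvSplit_ne_nil l)
  · simp

theorem foldA_ne (ps : List (List Char)) : ∀ m : List Char, m ≠ [] →
    ps.foldl pvF m = m ++ pvJ ps := by
  induction ps with
  | nil => intro m _; simp [pvJ]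
  | cons t ps ih =>
    intro m hm
    by_cases ht : t = []
    · subst ht; simp only [List.foldl_cons, pvF, pvJ]
      simp [ih m hm]
    · simp only [List.foldl_cons, pvF, pvJ, if_neg hm, if_neg ht]
      rw [if_pos (by cases t <;> simp_all)]
      rw [ih _ (by simp [hm])]
      simp

theorem foldA_nil (ps : List (List Char)) : ps.foldl pvF [] = pvA ps := by
  induction ps with
  | nil => simp [pvA]
  | cons t ps ih =>
    by_cases ht : t = []
    · subst ht; simpa [pvF, pvA] using ih
    · simp only [List.foldl_cons, pvF, pvA, if_neg ht]
      rw [if_pos (by cases t <;> simp_all)]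
      simp only [List.nil_append]
      exact foldA_ne ps t ht

theorem rtsB_inv (cs : List Char) : ∀ acc : List Char, acc ≠ [] →
    rtsB cs acc false = acc ++ (pvSplit cs).headI ++ pvJ (pvSplit cs).tail ∧
    rtsB cs acc true = acc ++ pvJ (pvSplit cs) := by
  induction cs with
  | nil => intro acc _; simp [rtsB, pvSplit, pvJ]
  | cons c cs ih =>
    intro acc hacc
    by_cases hc : c = ' '
    · subst hc
      have h2 := (ih acc hacc).2
      constructor <;> simp [rtsB, pvSplit, pvJ, hacc, h2]
    · have h1 := (ih (acc ++ [c]) (by simp)).1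
      have h2 := (ih (acc ++ [' ', c]) (by simp)).1
      constructor
      · simp [rtsB, hc, pvSplit, h1]
      · simp [rtsB, hc, pvSplit, pvJ, h2]

theorem rtsB_main (cs : List Char) : rtsB cs [] false = pvA (pvSplit cs) := by
  induction cs with
  | nil => simp [rtsB, pvSplit, pvA]
  | cons c cs ih =>
    by_cases hc : c = ' '
    · subst hc
      simp [rtsB, pvSplit, pvA, ih]
    · have h1 := (rtsB_inv cs [c] (by simp)).1
      rcases h' : pvSplit cs with _ | ⟨hd, tl⟩
      · exact absurd h' (pvSplit_ne_nil cs)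
      · simp [rtsB, hc, pvSplit, pvA, h', h1]

-- ===== VERDICT (by name: the statement is the Claim_ definition above) =====
theorem remove_trailing_space_spec : Claim_equal_remove_trailing_space := by
  intro a _
  unfold Spec_remove_trailing_space remove_trailing_space remove_trailing_space_alt
  rw [splitOn_eq, foldA_nil, rtsB_main]
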